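-- pv_equiv track=rewrite | github.com/oriolverges/Final-Degree-Project | Joint_RNA-Prot/Tokenizer.py | Pairs_Tokenizer
-- ===== SOURCE A (Python) =====
-- def Pairs_Tokenizer(df_sequences, tokenizer=None):
--     '''
--     Protein sequences tokenizer:
--     - Input = Serie of pairs of RNA (codons) + Amino acid
--     - Output = Sequences tokenized + number of tokens used
--     '''
--     if tokenizer is None:
--         tokenizer = dict()
--
--     tokenized_sequences = []
--
--     # Iterate over all sequences
--     for sequence in df_sequences:
--         seq = []
--
--         for pair in sequence:
--             if pair not in tokenizer:
--                 # +1 is used to avoid using token 0, to save it for padding.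
--                 tokenizer[pair] = len(tokenizer) + 1
--
--             seq.append(tokenizer[pair])
--
--         tokenized_sequences.append(seq)
--     return tokenized_sequences, len(tokenizer), tokenizer
-- ===== SOURCE B (Python) =====
-- def Pairs_Tokenizer(df_sequences, tokenizer=None):
--     '''Two-pass tokenizer: phase 1 learns the vocabulary (first-seen order,
--     respecting and mutating the incoming tokenizer dict in place, like A);
--     phase 2 encodes with pure lookups.'''
--     if tokenizer is None:
--         tokenizer = dict()
--
--     # Phase 1: build the full vocabulary table
--     for sequence in df_sequences:
--         for pair in sequence:
--             if pair not in tokenizer: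
--                 tokenizer[pair] = len(tokenizer) + 1
--
--     # Phase 2: encode, lookups only
--     tokenized_sequences = [[tokenizer[pair] for pair in sequence]
--                            for sequence in df_sequences]
--     return tokenized_sequences, len(tokenizer), tokenizer
-- ===== Notes on version B (the rewrite author's own statement) =====
-- stated objective: alternative
-- what changed: A fuses vocabulary building and encoding in one pass with a growing dict; B splits the work into a learn phase that builds the complete vocabulary first and a separate pure-lookup encode phase (list comprehensions), correct because later insertions never change existing bindings.
import Mathlib
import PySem

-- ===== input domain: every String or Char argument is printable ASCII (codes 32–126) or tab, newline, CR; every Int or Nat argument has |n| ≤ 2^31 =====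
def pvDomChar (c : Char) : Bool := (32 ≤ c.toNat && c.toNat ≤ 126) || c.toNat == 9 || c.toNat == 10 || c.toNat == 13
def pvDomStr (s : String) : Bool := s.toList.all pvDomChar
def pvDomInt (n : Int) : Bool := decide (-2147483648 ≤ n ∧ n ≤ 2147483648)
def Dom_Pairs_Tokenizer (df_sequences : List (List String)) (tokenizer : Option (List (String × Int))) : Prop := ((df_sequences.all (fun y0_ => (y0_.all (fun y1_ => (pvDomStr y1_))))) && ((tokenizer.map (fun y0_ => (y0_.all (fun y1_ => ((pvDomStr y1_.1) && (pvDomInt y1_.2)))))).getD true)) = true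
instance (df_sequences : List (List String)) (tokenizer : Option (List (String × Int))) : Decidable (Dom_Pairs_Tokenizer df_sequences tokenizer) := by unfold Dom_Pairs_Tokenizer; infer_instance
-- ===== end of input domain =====

-- B splits A's fused learn-and-encode loop into a vocabulary-building pass followed by a pure-lookup
-- encode pass (same return value; like A, the Python B mutates the passed-in tokenizer dict in place).


-- ===== PORT A =====
-- inner-loop body of A: possibly insert the pair, then append tokenizer[pair]
-- (the lookup is by getD _ 0; it never takes the default, the key was just ensured present)
def pvStepA (st : PySem.Dict String Int × List Int) (pair : String) :
    PySem.Dict String Int × List Int :=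
  let t := if st.1.contains pair then st.1 else st.1.insert pair ((st.1.size : Int) + 1)
  (t, st.2 ++ [t.getD pair 0])

def Pairs_Tokenizer (df_sequences : List (List String)) (tokenizer : Option (List (String × Int))) : List (List Int) × Int × (List (String × Int)) :=
  let res := df_sequences.foldl
    (fun (acc : PySem.Dict String Int × List (List Int)) sequence =>
      let inner := sequence.foldl pvStepA (acc.1, [])
      (inner.1, acc.2 ++ [inner.2]))
    (PySem.Dict.ofList (tokenizer.getD []), [])
  (res.2, (res.1.size : Int), res.1.items)

-- ===== PORT B =====
-- phase-1 body of B: record the pair if unseen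
def pvLearn (t : PySem.Dict String Int) (sequence : List String) : PySem.Dict String Int :=
  sequence.foldl
    (fun t pair => if t.contains pair then t else t.insert pair ((t.size : Int) + 1)) t

def Pairs_Tokenizer_alt (df_sequences : List (List String)) (tokenizer : Option (List (String × Int))) : List (List Int) × Int × (List (String × Int)) :=
  let t := df_sequences.foldl pvLearn (PySem.Dict.ofList (tokenizer.getD []))
  -- phase 2: pure lookups (getD _ 0 never takes the default: every pair was learned in phase 1)
  (df_sequences.map (fun sequence => sequence.map (fun pair => t.getD pair 0)),
   (t.size : Int), t.items)

-- ===== PRECONDITION & SPEC =====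
def Spec_Pairs_Tokenizer (df_sequences : List (List String)) (tokenizer : Option (List (String × Int))) (out : List (List Int) × Int × (List (String × Int))) : Prop := out = Pairs_Tokenizer_alt df_sequences tokenizer
instance (df_sequences : List (List String)) (tokenizer : Option (List (String × Int))) (out : List (List Int) × Int × (List (String × Int))) : Decidable (Spec_Pairs_Tokenizer df_sequences tokenizer out) := by unfold Spec_Pairs_Tokenizer; infer_instance

-- ===== CLAIM (what is proved, stated in full; the proofs are below) =====
def Claim_equal_Pairs_Tokenizer : Prop := ∀ (df_sequences : List (List String)) (tokenizer : Option (List (String × Int))), Dom_Pairs_Tokenizer df_sequences tokenizer → Spec_Pairs_Tokenizer df_sequences tokenizer (Pairs_Tokenizer df_sequences tokenizer)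

-- ===== LEMMAS AND PROOFS =====

-- one learn step never changes an existing binding
theorem pvLearn_preserves (s : List String) (t : PySem.Dict String Int) (p : String) (v : Int)
    (h : t.get? p = some v) : (pvLearn t s).get? p = some v := by
  induction s generalizing t with
  | nil => simpa [pvLearn] using h
  | cons q rest ih =>
    simp only [pvLearn, List.foldl_cons] at *
    by_cases hc : t.contains q = true
    · simpa [hc] using ih t h
    · simp only [hc, Bool.false_eq_true, if_false]
      apply ih
      rcases eq_or_ne p q with rfl | hne
      · rw [PySem.Dict.contains_eq_isSome_get?, h] at hc; simp at hc
      · rw [PySem.Dict.get?_insert_of_ne t _ hne]; exact h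

theorem pvLearnAll_preserves (ss : List (List String)) (t : PySem.Dict String Int)
    (p : String) (v : Int) (h : t.get? p = some v) :
    (ss.foldl pvLearn t).get? p = some v := by
  induction ss generalizing t with
  | nil => simpa using h
  | cons s rest ih => exact ih _ (pvLearn_preserves s t p v h)

-- the dict component of A's inner loop is pvLearn
theorem pvInner_fst (s : List String) (t : PySem.Dict String Int) (acc : List Int) :
    (s.foldl pvStepA (t, acc)).1 = pvLearn t s := by
  induction s generalizing t acc with
  | nil => rfl
  | cons q rest ih =>
    simp only [List.foldl_cons, pvStepA, pvLearn] at *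
    by_cases hc : t.contains q = true
    · simpa [hc] using ih t _
    · simpa [hc] using ih _ _

-- A's inner loop emits exactly the lookups into any dict that extends pvLearn t s
theorem pvInner_snd (s : List String) (t : PySem.Dict String Int) (acc : List Int)
    (d : PySem.Dict String Int)
    (hd : ∀ p v, (pvLearn t s).get? p = some v → d.get? p = some v) :
    (s.foldl pvStepA (t, acc)).2 = acc ++ s.map (fun p => d.getD p 0) := by
  induction s generalizing t acc with
  | nil => simp
  | cons q rest ih =>
    simp only [List.foldl_cons, pvStepA, List.map_cons]
    by_cases hc : t.contains q = true
    · have hex : ∃ v, t.get? q = some v := by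
        rw [PySem.Dict.contains_eq_isSome_get?] at hc
        exact Option.isSome_iff_exists.mp hc
      rcases hex with ⟨v, hv⟩
      have hstep : pvLearn t (q :: rest) = pvLearn t rest := by
        simp [pvLearn, hc]
      have hdq : d.get? q = some v := by
        apply hd; rw [hstep]; exact pvLearn_preserves _ _ _ _ hv
      have h1 : t.getD q 0 = v := PySem.Dict.getD_of_get?_eq_some t 0 hv
      have h2 : d.getD q 0 = v := PySem.Dict.getD_of_get?_eq_some d 0 hdq
      have hrec := ih t (acc ++ [t.getD q 0]) (by
        intro p w hw; apply hd; rw [hstep]; exact hw)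
      simp only [hc, if_true]
      rw [hrec, h1, h2]; simp
    · have hc' : t.contains q = false := by simpa using hc
      have hq1 : (t.insert q ((t.size : Int) + 1)).get? q = some ((t.size : Int) + 1) :=
        PySem.Dict.get?_insert_self t q _
      have hstep : pvLearn t (q :: rest) = pvLearn (t.insert q ((t.size : Int) + 1)) rest := by
        simp [pvLearn, hc']
      have hdq : d.get? q = some ((t.size : Int) + 1) := by
        apply hd; rw [hstep]; exact pvLearn_preserves _ _ _ _ hq1
      have h1 : (t.insert q ((t.size : Int) + 1)).getD q 0 = (t.size : Int) + 1 :=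
        PySem.Dict.getD_of_get?_eq_some _ 0 hq1
      have h2 : d.getD q 0 = (t.size : Int) + 1 := PySem.Dict.getD_of_get?_eq_some d 0 hdq
      have hrec := ih (t.insert q ((t.size : Int) + 1))
        (acc ++ [(t.insert q ((t.size : Int) + 1)).getD q 0])
        (by intro p w hw; apply hd; rw [hstep]; exact hw)
      simp only [hc', Bool.false_eq_true, if_false]
      rw [hrec, h1, h2]; simp

-- A's outer loop: dict component is the learn fold; emitted lists are lookups into the final dict
theorem pvOuter (ss : List (List String)) (t : PySem.Dict String Int) (acc : List (List Int))
    (d : PySem.Dict String Int)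
    (hd : ∀ p v, (ss.foldl pvLearn t).get? p = some v → d.get? p = some v) :
    (ss.foldl (fun (a : PySem.Dict String Int × List (List Int)) sequence =>
        let inner := sequence.foldl pvStepA (a.1, [])
        (inner.1, a.2 ++ [inner.2])) (t, acc)) =
    (ss.foldl pvLearn t, acc ++ ss.map (fun s => s.map (fun p => d.getD p 0))) := by
  induction ss generalizing t acc with
  | nil => simp
  | cons s rest ih =>
    simp only [List.foldl_cons, List.map_cons]
    have hfst : (s.foldl pvStepA (t, [])).1 = pvLearn t s := pvInner_fst s t []
    have hsnd : (s.foldl pvStepA (t, [])).2 = [] ++ s.map (fun p => d.getD p 0) :=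
      pvInner_snd s t [] d (by
        intro p v hv
        apply hd
        simp only [List.foldl_cons]
        exact pvLearnAll_preserves rest _ _ _ hv)
    have hstart : (let inner := s.foldl pvStepA (t, []); (inner.1, acc ++ [inner.2]))
        = ((pvLearn t s : PySem.Dict String Int), acc ++ [s.map (fun p => d.getD p 0)]) := by
      show ((s.foldl pvStepA (t, [])).1, acc ++ [(s.foldl pvStepA (t, [])).2]) = _
      rw [hfst, hsnd]; simp
    rw [hstart]
    have hrec := ih (pvLearn t s) (acc ++ [s.map (fun p => d.getD p 0)]) (by
      intro p v hv; apply hd; simpa using hv)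
    rw [hrec]
    simp

-- ===== VERDICT (by name: the statement is the Claim_ definition above) =====
theorem Pairs_Tokenizer_spec : Claim_equal_Pairs_Tokenizer := by
  intro df_sequences tokenizer _
  show Pairs_Tokenizer df_sequences tokenizer = Pairs_Tokenizer_alt df_sequences tokenizer
  show (let res := df_sequences.foldl
          (fun (acc : PySem.Dict String Int × List (List Int)) sequence =>
            let inner := sequence.foldl pvStepA (acc.1, [])
            (inner.1, acc.2 ++ [inner.2]))
          (PySem.Dict.ofList (tokenizer.getD []), [])
        (res.2, (res.1.size : Int), res.1.items)) =
      (let t := df_sequences.foldl pvLearn (PySem.Dict.ofList (tokenizer.getD []))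
       (df_sequences.map (fun sequence => sequence.map (fun pair => t.getD pair 0)),
        (t.size : Int), t.items))
  rw [pvOuter df_sequences (PySem.Dict.ofList (tokenizer.getD [])) []
        (df_sequences.foldl pvLearn (PySem.Dict.ofList (tokenizer.getD [])))
        (fun _ _ h => h)]
  simp
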